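-- pv_equiv track=rewrite | github.com/broadinstitute/scp-ingest-pipeline | ingest/validation/validate_metadata.py | identify_multiply_assigned
-- ===== SOURCE A (Python) =====
-- from collections import defaultdict
--
-- def identify_multiply_assigned(list):
--     """Given a list of ontology IDs and their purported labels,
--     return list of unique multiply-assigned labels
--     """
--     ontology_tracker = defaultdict(lambda: defaultdict(int))
--     multiply_assigned = []
--     for element in list:
--         id, label = element
--         ontology_tracker[label][id] += 1
--     for label in ontology_tracker:
--         if len(ontology_tracker[label].keys()) > 1:
--             multiply_assigned.append(label)
--     multiply_assigned.sort()
--     return multiply_assigned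
-- ===== SOURCE B (Python) =====
-- def identify_multiply_assigned(list):
--     """Given a list of ontology IDs and their purported labels,
--     return list of unique multiply-assigned labels
--     """
--     seen = {}
--     conflicts = set()
--     for element in list:
--         id, label = element
--         if label not in seen:
--             seen[label] = id
--         elif seen[label] != id:
--             conflicts.add(label)
--     return sorted(conflicts)
-- ===== Notes on version B (the rewrite author's own statement) =====
-- stated objective: simpler
-- what changed: Replaced the nested per-label count table plus a second pass over it with a single pass that records the first id seen per label and accumulates conflicting labels directly into a set, then sorts the set.
import Mathlib
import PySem

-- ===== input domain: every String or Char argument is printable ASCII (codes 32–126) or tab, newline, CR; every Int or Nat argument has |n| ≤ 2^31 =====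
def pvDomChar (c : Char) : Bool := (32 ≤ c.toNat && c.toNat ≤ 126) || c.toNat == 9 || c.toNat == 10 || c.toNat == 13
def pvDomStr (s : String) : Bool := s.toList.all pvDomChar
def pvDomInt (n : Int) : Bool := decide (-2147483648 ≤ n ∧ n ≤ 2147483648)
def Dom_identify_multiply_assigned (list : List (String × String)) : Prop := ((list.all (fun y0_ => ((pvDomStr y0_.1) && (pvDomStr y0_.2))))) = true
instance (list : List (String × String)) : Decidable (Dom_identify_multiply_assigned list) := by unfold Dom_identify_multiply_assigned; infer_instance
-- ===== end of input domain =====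

-- B replaces A's nested per-label count table and second pass by a single pass that
-- records the first id per label and accumulates conflicting labels into a set (simpler).

-- ===== PORT A =====
def identify_multiply_assigned (list : List (String × String)) : List String :=
  let tracker : PySem.Dict String (PySem.Dict String Int) :=
    list.foldl (fun d element =>
      d.modify element.2 PySem.Dict.empty (fun inner => inner.modify element.1 0 (· + 1)))
      PySem.Dict.empty
  let multiply_assigned : List String :=
    tracker.keys.foldl (fun acc label =>
      if ((tracker.getD label PySem.Dict.empty).keys).length > 1 then acc ++ [label] else acc) []
  PySem.List.sorted multiply_assigned (fun x => x)

-- ===== PORT B =====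
def identify_multiply_assigned_alt (list : List (String × String)) : List String :=
  let st : PySem.Dict String String × PySem.Set String :=
    list.foldl (fun st element =>
      let id := element.1
      let label := element.2
      if st.1.contains label = false then (st.1.insert label id, st.2)
      else if st.1.getD label "" ≠ id then (st.1, st.2.add label)
      else st)
      (PySem.Dict.empty, PySem.Set.empty)
  PySem.List.sorted st.2 (fun x => x)

-- ===== PRECONDITION & SPEC =====
def Spec_identify_multiply_assigned (list : List (String × String)) (out : List String) : Prop := out = identify_multiply_assigned_alt list
instance (list : List (String × String)) (out : List String) : Decidable (Spec_identify_multiply_assigned list out) := by unfold Spec_identify_multiply_assigned; infer_instance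

-- ===== CLAIM (what is proved, stated in full; the proofs are below) =====
def Claim_equal_identify_multiply_assigned : Prop := ∀ (list : List (String × String)), Dom_identify_multiply_assigned list → Spec_identify_multiply_assigned list (identify_multiply_assigned list)

-- ===== LEMMAS AND PROOFS =====

-- A label is "multiply assigned" in l: two occurrences with distinct ids.
def pvMulti (l : List (String × String)) (label : String) : Prop :=
  ∃ a b, (a, label) ∈ l ∧ (b, label) ∈ l ∧ a ≠ b

theorem pvMemConsNe (pid plab label : String) (rest : List (String × String))
    (h : label ≠ plab) : ∀ a : String, ((a, label) ∈ (pid, plab) :: rest) ↔ (a, label) ∈ rest := by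
  intro a; simp [Prod.ext_iff, h]

theorem pvMemConsHead (pid plab : String) (rest : List (String × String)) :
    ∀ a : String, ((a, plab) ∈ (pid, plab) :: rest) ↔ a = pid ∨ (a, plab) ∈ rest := by
  intro a; simp [Prod.ext_iff]

theorem pvMulti_cons_ne (pid plab label : String) (rest : List (String × String))
    (h : label ≠ plab) : pvMulti ((pid, plab) :: rest) label ↔ pvMulti rest label := by
  unfold pvMulti
  simp only [pvMemConsNe pid plab label rest h]

theorem pvMulti_cons_head (pid plab : String) (rest : List (String × String)) :
    pvMulti ((pid, plab) :: rest) plab ↔ ∃ a, (a, plab) ∈ rest ∧ a ≠ pid := by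
  unfold pvMulti
  simp only [pvMemConsHead pid plab rest]
  constructor
  · rintro ⟨a, b, (ha | ha), (hb | hb), hab⟩
    · subst ha; subst hb; exact absurd rfl hab
    · exact ⟨b, hb, fun hh => hab (by rw [ha, hh])⟩
    · exact ⟨a, ha, fun hh => hab (by rw [hb, hh])⟩
    · by_cases hap : a = pid
      · exact ⟨b, hb, fun hh => hab (by rw [hap, hh])⟩
      · exact ⟨a, ha, hap⟩
  · rintro ⟨a, ha, hane⟩
    exact ⟨a, pid, Or.inr ha, Or.inl rfl, hane⟩

-- a nodup list has two distinct members iff its length exceeds 1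
theorem pvNodupTwo {K : List String} (hnd : K.Nodup) :
    1 < K.length ↔ ∃ a ∈ K, ∃ b ∈ K, a ≠ b := by
  match K with
  | [] => simp
  | [x] => simp
  | x :: y :: t =>
    constructor
    · intro _
      refine ⟨x, by simp, y, by simp, ?_⟩
      intro h; subst h
      exact (List.nodup_cons.1 hnd).1 (by simp)
    · intro _
      simp only [List.length_cons]
      omega

-- ===== A-side characterisation =====

-- A's tracker-building step
def pvAStep (d : PySem.Dict String (PySem.Dict String Int)) (element : String × String) :
    PySem.Dict String (PySem.Dict String Int) :=
  d.modify element.2 PySem.Dict.empty (fun inner => inner.modify element.1 0 (· + 1))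

theorem pvAStepGetD (d : PySem.Dict String (PySem.Dict String Int)) (pid plab lab : String) :
    (pvAStep d (pid, plab)).getD lab PySem.Dict.empty =
      if lab = plab then (d.getD plab PySem.Dict.empty).modify pid 0 (· + 1)
      else d.getD lab PySem.Dict.empty := by
  rw [pvAStep]
  exact PySem.Dict.getD_modify d plab lab PySem.Dict.empty _

theorem pvAInnerMem (l : List (String × String)) :
    ∀ (d : PySem.Dict String (PySem.Dict String Int)) (id label : String),
    id ∈ ((l.foldl pvAStep d).getD label PySem.Dict.empty).keys ↔
      id ∈ (d.getD label PySem.Dict.empty).keys ∨ (id, label) ∈ l := by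
  induction l with
  | nil => intro d id label; simp [List.foldl]
  | cons p rest ih =>
    rcases p with ⟨pid, plab⟩
    intro d id label
    rw [List.foldl_cons, ih]
    by_cases h : label = plab
    · subst h
      rw [pvAStepGetD, if_pos rfl, PySem.Dict.keys_modify, PySem.Dict.mem_keys_insert]
      rw [pvMemConsHead pid label rest id]
      tauto
    · rw [pvAStepGetD, if_neg h, pvMemConsNe pid plab label rest h id]

theorem pvAInnerNodup (l : List (String × String)) :
    ∀ (d : PySem.Dict String (PySem.Dict String Int)),
    (∀ lab, ((d.getD lab PySem.Dict.empty).keys).Nodup) →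
    ∀ lab, (((l.foldl pvAStep d).getD lab PySem.Dict.empty).keys).Nodup := by
  induction l with
  | nil => intro d h lab; simpa using h lab
  | cons p rest ih =>
    rcases p with ⟨pid, plab⟩
    intro d h lab
    rw [List.foldl_cons]
    refine ih _ ?_ lab
    intro lab'
    rw [pvAStepGetD]
    by_cases hl : lab' = plab
    · rw [if_pos hl, PySem.Dict.keys_modify]
      exact PySem.Dict.nodup_keys_insert _ _ _ (h _)
    · rw [if_neg hl]; exact h _

-- ===== B-side characterisation =====

-- B's single-pass step
def pvBStep (st : PySem.Dict String String × PySem.Set String) (element : String × String) :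
    PySem.Dict String String × PySem.Set String :=
  if st.1.contains element.2 = false then (st.1.insert element.2 element.1, st.2)
  else if st.1.getD element.2 "" ≠ element.1 then (st.1, st.2.add element.2)
  else st

-- what the conflicts set will collect for a given label, given the current 'seen' map
def pvAfter (seen : PySem.Dict String String) (l : List (String × String)) (label : String) : Prop :=
  match seen.get? label with
  | some v => ∃ a, (a, label) ∈ l ∧ a ≠ v
  | none => pvMulti l label

theorem pvAfter_some {seen : PySem.Dict String String} {label v : String}
    (h : seen.get? label = some v) (l : List (String × String)) :
    pvAfter seen l label ↔ ∃ a, (a, label) ∈ l ∧ a ≠ v := by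
  unfold pvAfter; rw [h]

theorem pvAfter_none {seen : PySem.Dict String String} {label : String}
    (h : seen.get? label = none) (l : List (String × String)) :
    pvAfter seen l label ↔ pvMulti l label := by
  unfold pvAfter; rw [h]

theorem pvBMem (l : List (String × String)) :
    ∀ (seen : PySem.Dict String String) (conf : PySem.Set String) (label : String),
    label ∈ (l.foldl pvBStep (seen, conf)).2 ↔ label ∈ conf ∨ pvAfter seen l label := by
  induction l with
  | nil =>
    intro seen conf label
    rcases h : seen.get? label with _ | v
    · simp [List.foldl, pvAfter_none h, pvMulti]
    · simp [List.foldl, pvAfter_some h]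
  | cons p rest ih =>
    rcases p with ⟨pid, plab⟩
    intro seen conf label
    rw [List.foldl_cons]
    rcases hc : seen.get? plab with _ | v
    · -- label not yet seen: insert
      have hcont : seen.contains plab = false := by
        rw [PySem.Dict.contains_eq_isSome_get?, hc]; rfl
      rw [show pvBStep (seen, conf) (pid, plab) = (seen.insert plab pid, conf) by
        simp [pvBStep, hcont]]
      rw [ih]
      by_cases h : label = plab
      · subst h
        rw [pvAfter_some (show (seen.insert label pid).get? label = some pid by
              rw [PySem.Dict.get?_insert]; simp) rest,
            pvAfter_none hc, pvMulti_cons_head]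
      · have hg' : (seen.insert plab pid).get? label = seen.get? label := by
          rw [PySem.Dict.get?_insert, if_neg h]
        rcases hg : seen.get? label with _ | v
        · rw [pvAfter_none (hg'.trans hg) rest, pvAfter_none hg,
              pvMulti_cons_ne pid plab label rest h]
        · rw [pvAfter_some (hg'.trans hg) rest, pvAfter_some hg]
          simp only [pvMemConsNe pid plab label rest h]
    · have hcont : seen.contains plab = true := by
        rw [PySem.Dict.contains_eq_isSome_get?, hc]; rfl
      have hgd : seen.getD plab "" = v := by
        rw [PySem.Dict.getD_eq_get?_getD, hc]; rfl
      by_cases hv : v = pid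
      · -- same id as the first seen: state unchanged
        rw [show pvBStep (seen, conf) (pid, plab) = (seen, conf) by
          simp [pvBStep, hcont, hgd, hv]]
        rw [ih]
        by_cases h : label = plab
        · subst h
          rw [pvAfter_some hc rest, pvAfter_some hc]
          simp only [pvMemConsHead pid label rest]
          constructor
          · rintro (h1 | ⟨a, ha, hne⟩)
            · exact Or.inl h1
            · exact Or.inr ⟨a, Or.inr ha, hne⟩
          · rintro (h1 | ⟨a, (ha | ha), hne⟩)
            · exact Or.inl h1
            · exact absurd (ha.trans hv.symm) hne
            · exact Or.inr ⟨a, ha, hne⟩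
        · rcases hg : seen.get? label with _ | w
          · rw [pvAfter_none hg rest, pvAfter_none hg,
                pvMulti_cons_ne pid plab label rest h]
          · rw [pvAfter_some hg rest, pvAfter_some hg]
            simp only [pvMemConsNe pid plab label rest h]
      · -- conflicting id: add the label to conflicts
        rw [show pvBStep (seen, conf) (pid, plab) = (seen, conf.add plab) by
          simp [pvBStep, hcont, hgd, hv]]
        rw [ih, PySem.Set.mem_add]
        by_cases h : label = plab
        · subst h
          rw [pvAfter_some hc rest, pvAfter_some hc]
          refine iff_of_true (Or.inl (Or.inr rfl)) (Or.inr ?_)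
          exact ⟨pid, (pvMemConsHead pid label rest pid).2 (Or.inl rfl),
            fun he => hv (he.symm)⟩
        · have hlp : ¬(label = plab) := h
          rcases hg : seen.get? label with _ | w
          · rw [pvAfter_none hg rest, pvAfter_none hg,
                pvMulti_cons_ne pid plab label rest h]
            tauto
          · rw [pvAfter_some hg rest, pvAfter_some hg]
            simp only [pvMemConsNe pid plab label rest h]
            tauto

theorem pvBNodup (l : List (String × String)) :
    ∀ (seen : PySem.Dict String String) (conf : PySem.Set String), conf.Nodup →
    ((l.foldl pvBStep (seen, conf)).2).Nodup := by
  induction l with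
  | nil => intro seen conf h; exact h
  | cons p rest ih =>
    intro seen conf h
    rw [List.foldl_cons, pvBStep]
    split_ifs with h1 h2
    · exact ih _ _ h
    · exact ih _ _ (PySem.Set.nodup_add _ _ h)
    · exact ih _ _ h

theorem pvAList (list : List (String × String)) :
    identify_multiply_assigned list =
      PySem.List.sorted
        ((list.foldl pvAStep PySem.Dict.empty).keys.filter
          (fun label =>
            decide (1 < (((list.foldl pvAStep PySem.Dict.empty).getD label PySem.Dict.empty).keys).length)))
        (fun x => x) := by
  have h1 : identify_multiply_assigned list = PySem.List.sorted
      ((list.foldl pvAStep PySem.Dict.empty).keys.foldl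
        (fun acc label =>
          if (fun label => decide (1 < (((list.foldl pvAStep PySem.Dict.empty).getD label
              PySem.Dict.empty).keys).length)) label = true
          then acc ++ [(fun x : String => x) label] else acc) [])
      (fun x => x) := by
    unfold identify_multiply_assigned pvAStep
    simp only [decide_eq_true_eq, gt_iff_lt]
  rw [h1, PySem.List.foldl_append_if]
  simp

theorem pvBList (list : List (String × String)) :
    identify_multiply_assigned_alt list =
      PySem.List.sorted ((list.foldl pvBStep (PySem.Dict.empty, PySem.Set.empty)).2) (fun x => x) := by
  unfold identify_multiply_assigned_alt pvBStep
  rfl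

-- ===== VERDICT (by name: the statement is the Claim_ definition above) =====
theorem identify_multiply_assigned_spec : Claim_equal_identify_multiply_assigned := by
  intro list _
  unfold Spec_identify_multiply_assigned
  rw [pvAList, pvBList]
  set tracker := list.foldl pvAStep PySem.Dict.empty with htr
  set conflicts := (list.foldl pvBStep (PySem.Dict.empty, PySem.Set.empty)).2 with hcf
  have hAkeys : tracker.keys = PySem.Set.ofList (list.map (·.2)) := by
    rw [htr]
    rw [show pvAStep = (fun d (element : String × String) =>
      PySem.Dict.modify d element.2 PySem.Dict.empty
        ((fun (_ : PySem.Dict String (PySem.Dict String Int)) (element : String × String)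
            (inner : PySem.Dict String Int) => inner.modify element.1 0 (· + 1)) d element)) from rfl]
    rw [PySem.Dict.keys_foldl_modify_key list (fun x => x.2) PySem.Dict.empty _ PySem.Dict.empty]
    rw [PySem.Dict.keys_empty]
    exact PySem.Set.update_empty _
  have hAkeysNodup : tracker.keys.Nodup := by
    rw [hAkeys]; exact PySem.Set.nodup_ofList _
  have hAnodup : ((tracker.keys.filter
      (fun label => decide (1 < ((tracker.getD label PySem.Dict.empty).keys).length)))).Nodup :=
    hAkeysNodup.filter _
  have hBnodup : conflicts.Nodup := pvBNodup list PySem.Dict.empty PySem.Set.empty List.nodup_nil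
  have hmemA : ∀ label, label ∈ (tracker.keys.filter
      (fun label => decide (1 < ((tracker.getD label PySem.Dict.empty).keys).length))) ↔
      pvMulti list label := by
    intro label
    rw [List.mem_filter]
    have hinner : ∀ id, id ∈ ((tracker.getD label PySem.Dict.empty).keys) ↔ (id, label) ∈ list := by
      intro id
      rw [htr, pvAInnerMem list PySem.Dict.empty id label]
      simp [PySem.Dict.getD_empty, PySem.Dict.keys_empty]
    have hindnd : ((tracker.getD label PySem.Dict.empty).keys).Nodup := by
      rw [htr]
      exact pvAInnerNodup list PySem.Dict.empty
        (fun lab => by rw [PySem.Dict.getD_empty, PySem.Dict.keys_empty]; exact List.nodup_nil) label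
    constructor
    · rintro ⟨_, hlen⟩
      rcases (pvNodupTwo hindnd).1 (by simpa using hlen) with ⟨a, ha, b, hb, hab⟩
      exact ⟨a, b, (hinner a).1 ha, (hinner b).1 hb, hab⟩
    · rintro ⟨a, b, ha, hb, hab⟩
      refine ⟨?_, ?_⟩
      · rw [hAkeys, PySem.Set.mem_ofList, List.mem_map]
        exact ⟨(a, label), ha, rfl⟩
      · simp only [decide_eq_true_eq]
        exact (pvNodupTwo hindnd).2 ⟨a, (hinner a).2 ha, b, (hinner b).2 hb, hab⟩
  have hmemB : ∀ label, label ∈ conflicts ↔ pvMulti list label := by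
    intro label
    rw [hcf, pvBMem list PySem.Dict.empty PySem.Set.empty label,
        pvAfter_none (PySem.Dict.get?_empty label) list]
    simp [PySem.Set.empty]
  have hperm : (tracker.keys.filter
      (fun label => decide (1 < ((tracker.getD label PySem.Dict.empty).keys).length))).Perm conflicts := by
    rw [List.perm_ext_iff_of_nodup hAnodup hBnodup]
    intro a; rw [hmemA a, hmemB a]
  exact PySem.List.sorted_eq_sorted_of_perm _ _ (fun x => x) (fun a b h => h) hperm
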